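-- pv_equiv track=rewrite | github.com/0xC000005/MIE566 | Projects/utilities.py | calculate_utility
-- ===== SOURCE A (Python) =====
-- def calculate_utility(actions: list[int], price_changes: list[int]) -> int:
--     initial_price = 2
--     assets = [0] * 3
--     costs = [0] * 3
--     gains = [0] * 3
--     utility = [0] * 3
--     prices = [initial_price]
--
--     for price_change in price_changes:
--         prices.append(prices[-1] + price_change)
--
--     for i in range(3):
--         previous_action = None
--         if i > 0:
--             # previous action is the first non-zero action before this time
--             for j in range(i - 1, -1, -1):
--                 if actions[j] != 0:
--                     previous_action = actions[j]
--                     break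
--         if actions[i] == 0:
--             continue
--
--         # case 1: buy buy or sell sell or at the beginning
--         elif previous_action == actions[i] or previous_action is None:
--             if actions[i] == 1:
--                 # cost of buying is the current price
--                 costs[i] = prices[i]
--                 # asset is 1
--                 assets[i] = 1
--             elif actions[i] == -1:
--                 # gain of selling is the current price
--                 gains[i] = prices[i]
--                 # asset is -1
--                 assets[i] = -1
--
--             # no change to the utility since there is no realized profit
--
--         # case 2: buy sell
--         elif previous_action == 1 and actions[i] == -1:
--             # calculate all the asset before this time
--             total_asset_to_sell = sum(assets[:i])
--
--             # calculate the gain from selling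
--             gains[i] = total_asset_to_sell * prices[i]
--
--             # since it is a buy sell case, there will many non-zero costs but only one non-zero gain
--             # calculate all the cost so far
--             cost_so_far = sum(costs[:i])
--
--             # calculate the utility
--             utility[i] = gains[i] - cost_so_far
--
--             # since we realized the gain, we set the assets, costs and gains all back to 0
--             assets = [0] * 3
--             costs = [0] * 3
--             gains = [0] * 3
--
--         # case 3: sell buy (short sell)
--         elif previous_action == -1 and actions[i] == 1:
--             # calculate all the asset before this time
--             total_asset_to_buy = -sum(assets[:i])
--
--             # calculate the cost from buying back the asset we owe
--             costs[i] = total_asset_to_buy * prices[i]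
--
--             # since it is a sell buy case, there will many non-zero gains but only one non-zero cost
--             # calculate all the gains so far
--             gain_so_far = sum(gains[:i])
--
--             # calculate the utility
--             utility[i] = gain_so_far - costs[i]
--
--             # since we realized the gain, we set the assets, costs and gains all back to 0
--             assets = [0] * 3
--             costs = [0] * 3
--             gains = [0] * 3
--
--     return sum(utility)
-- ===== SOURCE B (Python) =====
-- def calculate_utility(actions: list[int], price_changes: list[int]) -> int:
--     prices = [2]
--     for price_change in price_changes:
--         prices.append(prices[-1] + price_change)
--
--     position = 0       # net assets held (signed)
--     total_cost = 0     # cost accumulated since last realization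
--     total_gain = 0     # gain accumulated since last realization
--     last_dir = None    # most recent non-zero action seen
--     utility = 0
--
--     for i in range(3):
--         a = actions[i]
--         if a == 0:
--             continue
--         if last_dir is None or last_dir == a:
--             if a == 1:
--                 total_cost += prices[i]
--                 position += 1
--             elif a == -1:
--                 total_gain += prices[i]
--                 position -= 1
--         elif last_dir == 1 and a == -1:
--             utility += position * prices[i] - total_cost
--             position = total_cost = total_gain = 0
--         elif last_dir == -1 and a == 1:
--             utility += total_gain - (-position) * prices[i]
--             position = total_cost = total_gain = 0
--         last_dir = a
--     return utility
-- ===== Notes on version B (the rewrite author's own statement) =====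
-- stated objective: simpler
-- what changed: Replaces the three parallel length-3 arrays, the backward inner scan for the previous non-zero action, and the slice sums with four scalar accumulators (position, total_cost, total_gain, last_dir) maintained in one pass.
import Mathlib
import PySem

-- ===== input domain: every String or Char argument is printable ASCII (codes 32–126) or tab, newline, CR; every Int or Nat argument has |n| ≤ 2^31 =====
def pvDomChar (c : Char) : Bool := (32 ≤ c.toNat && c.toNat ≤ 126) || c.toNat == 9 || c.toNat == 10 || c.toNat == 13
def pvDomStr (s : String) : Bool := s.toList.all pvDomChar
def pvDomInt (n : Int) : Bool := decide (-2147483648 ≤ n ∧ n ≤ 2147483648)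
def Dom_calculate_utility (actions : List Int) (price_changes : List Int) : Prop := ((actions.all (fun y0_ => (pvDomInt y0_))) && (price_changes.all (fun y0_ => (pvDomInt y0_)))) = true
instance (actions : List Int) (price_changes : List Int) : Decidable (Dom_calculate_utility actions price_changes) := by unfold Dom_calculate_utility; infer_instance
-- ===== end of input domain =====

-- B replaces A's three parallel arrays, backward previous-action scan and slice sums
-- by scalar accumulators maintained in one pass (objective: simpler; same cost).

-- ===== PORT A =====
-- prices = [2]; for pc in price_changes: prices.append(prices[-1] + pc)   (shared by both sources verbatim)
def pvBuildPrices (pcs : List Int) (ps : List Int) : List Int :=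
  match pcs with
  | [] => ps
  | pc :: rest => pvBuildPrices rest (ps ++ [PySem.List.pyGetD ps (-1) 0 + pc])

-- for j in range(i-1,-1,-1): if actions[j] != 0: previous_action = actions[j]; break
def pvPrevHelper (actions : List Int) (js : List Int) : Option Int :=
  match js with
  | [] => none
  | j :: rest =>
    if PySem.List.pyGetD actions j 0 ≠ 0 then some (PySem.List.pyGetD actions j 0)
    else pvPrevHelper actions rest

-- one iteration of A's `for i in range(3)` body over (assets, costs, gains, utility)
def pvStepA (actions prices : List Int)
    (st : List Int × List Int × List Int × List Int) (i : Int) :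
    List Int × List Int × List Int × List Int :=
  let assets := st.1
  let costs := st.2.1
  let gains := st.2.2.1
  let utility := st.2.2.2
  let previous_action : Option Int :=
    if i > 0 then pvPrevHelper actions (PySem.List.pyRange (i - 1) (-1) (-1)) else none
  let a := PySem.List.pyGetD actions i 0
  if a = 0 then (assets, costs, gains, utility)
  else if previous_action = some a ∨ previous_action = none then
    if a = 1 then
      (assets.set i.toNat 1, costs.set i.toNat (PySem.List.pyGetD prices i 0), gains, utility)
    else if a = -1 then
      (assets.set i.toNat (-1), costs, gains.set i.toNat (PySem.List.pyGetD prices i 0), utility)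
    else (assets, costs, gains, utility)
  else if previous_action = some 1 ∧ a = -1 then
    let total_asset_to_sell := (PySem.List.slice assets none (some i)).sum
    let g := total_asset_to_sell * PySem.List.pyGetD prices i 0
    let cost_so_far := (PySem.List.slice costs none (some i)).sum
    ([0, 0, 0], [0, 0, 0], [0, 0, 0], utility.set i.toNat (g - cost_so_far))
  else if previous_action = some (-1) ∧ a = 1 then
    let total_asset_to_buy := -(PySem.List.slice assets none (some i)).sum
    let c := total_asset_to_buy * PySem.List.pyGetD prices i 0
    let gain_so_far := (PySem.List.slice gains none (some i)).sum
    ([0, 0, 0], [0, 0, 0], [0, 0, 0], utility.set i.toNat (gain_so_far - c))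
  else (assets, costs, gains, utility)

def calculate_utility (actions : List Int) (price_changes : List Int) : Int :=
  let prices := pvBuildPrices price_changes [2]
  let final := (PySem.List.pyRange 0 3 1).foldl (pvStepA actions prices)
                 ([0, 0, 0], [0, 0, 0], [0, 0, 0], [0, 0, 0])
  final.2.2.2.sum

-- ===== PORT B =====
-- one iteration of B's loop over (position, total_cost, total_gain, last_dir, utility)
def pvStepB (actions prices : List Int)
    (st : Int × Int × Int × Option Int × Int) (i : Int) :
    Int × Int × Int × Option Int × Int :=
  let position := st.1
  let total_cost := st.2.1
  let total_gain := st.2.2.1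
  let last_dir := st.2.2.2.1
  let utility := st.2.2.2.2
  let a := PySem.List.pyGetD actions i 0
  if a = 0 then st
  else if last_dir = none ∨ last_dir = some a then
    if a = 1 then
      (position + 1, total_cost + PySem.List.pyGetD prices i 0, total_gain, some a, utility)
    else if a = -1 then
      (position - 1, total_cost, total_gain + PySem.List.pyGetD prices i 0, some a, utility)
    else (position, total_cost, total_gain, some a, utility)
  else if last_dir = some 1 ∧ a = -1 then
    (0, 0, 0, some a, utility + (position * PySem.List.pyGetD prices i 0 - total_cost))
  else if last_dir = some (-1) ∧ a = 1 then
    (0, 0, 0, some a, utility + (total_gain - (-position) * PySem.List.pyGetD prices i 0))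
  else (position, total_cost, total_gain, some a, utility)

def calculate_utility_alt (actions : List Int) (price_changes : List Int) : Int :=
  let prices := pvBuildPrices price_changes [2]
  ((PySem.List.pyRange 0 3 1).foldl (pvStepB actions prices) (0, 0, 0, none, 0)).2.2.2.2

-- ===== PRECONDITION & SPEC =====
-- first non-zero action among the first i (scanning backwards), as A's inner loop computes it
def pvPrevRaw (actions : List Int) (i : Nat) : Option Int :=
  ((actions.take i).reverse).find? (fun x => x ≠ 0)

-- Exactly the inputs on which Python A returns: at least 3 actions (actions[i] is read for
-- i = 0,1,2), and whenever step i prices the action (actions[i] ∈ {1,-1} and the previous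
-- non-zero action is absent or in {1,-1}), prices[i] must exist, i.e. i ≤ len(price_changes).
def Pre_calculate_utility (actions : List Int) (price_changes : List Int) : Prop :=
  3 ≤ actions.length ∧
  ∀ i : Nat, i < 3 →
    ((actions.getD i 0 = 1 ∨ actions.getD i 0 = -1) ∧
     (pvPrevRaw actions i = none ∨ pvPrevRaw actions i = some 1 ∨ pvPrevRaw actions i = some (-1))) →
    i ≤ price_changes.length
instance (actions : List Int) (price_changes : List Int) : Decidable (Pre_calculate_utility actions price_changes) := by
  unfold Pre_calculate_utility; infer_instance

def pvWitness_calculate_utility : List Int × List Int := ([1, 0, -1], [1, 1])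

def Spec_calculate_utility (actions : List Int) (price_changes : List Int) (out : Int) : Prop := out = calculate_utility_alt actions price_changes
instance (actions : List Int) (price_changes : List Int) (out : Int) : Decidable (Spec_calculate_utility actions price_changes out) := by unfold Spec_calculate_utility; infer_instance

-- ===== CLAIM (what is proved, stated in full; the proofs are below) =====
def Claim_equal_calculate_utility : Prop := ∀ (actions : List Int) (price_changes : List Int), Dom_calculate_utility actions price_changes → Pre_calculate_utility actions price_changes → Spec_calculate_utility actions price_changes (calculate_utility actions price_changes)

-- ===== LEMMAS AND PROOFS =====




theorem pvPrev1 (actions : List Int) :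
    pvPrevHelper actions [(0:Int)] = pvPrevRaw actions 1 := by
  rcases actions with _ | ⟨x, t⟩ <;>
    simp [pvPrevHelper, pvPrevRaw, PySem.List.pyGetD_ofNat', PySem.List.pyGetD_zero] <;>
    split_ifs <;> simp_all

theorem pvPrev2 (actions : List Int) :
    pvPrevHelper actions [(1:Int), 0] = pvPrevRaw actions 2 := by
  rcases actions with _ | ⟨x, _ | ⟨y, t⟩⟩ <;>
    simp [pvPrevHelper, pvPrevRaw, PySem.List.pyGetD_ofNat', PySem.List.pyGetD_zero] <;>
    split_ifs <;> simp_all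

theorem pvPrevSucc_zero (actions : List Int) (i : Nat) (h : actions.getD i 0 = 0) :
    pvPrevRaw actions (i+1) = pvPrevRaw actions i := by
  unfold pvPrevRaw
  rw [List.take_add_one]
  rcases hg : actions[i]? with _ | a
  · simp [hg]
  · have : a = 0 := by rw [List.getD_eq_getElem?_getD, hg] at h; simpa using h
    subst this
    simp [hg]

theorem pvPrevSucc_ne (actions : List Int) (i : Nat) (h : actions.getD i 0 ≠ 0) :
    pvPrevRaw actions (i+1) = some (actions.getD i 0) := by
  unfold pvPrevRaw
  rw [List.take_add_one]
  rcases hg : actions[i]? with _ | a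
  · rw [List.getD_eq_getElem?_getD, hg] at h; simp at h
  · rw [List.getD_eq_getElem?_getD, hg]
    have : a ≠ 0 := by rw [List.getD_eq_getElem?_getD, hg] at h; simpa using h
    simp [hg, this]




theorem pvPrevRaw0 (actions : List Int) : pvPrevRaw actions 0 = none := by
  simp [pvPrevRaw]

theorem pvPrevRaw1z (actions : List Int) (h : actions[0]?.getD 0 = 0) :
    pvPrevRaw actions 1 = none := by
  rw [show (1:Nat) = 0+1 from rfl, pvPrevSucc_zero actions 0 (by rw [List.getD_eq_getElem?_getD]; exact h), pvPrevRaw0]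

theorem pvPrevRaw1n (actions : List Int) (h : ¬ actions[0]?.getD 0 = 0) :
    pvPrevRaw actions 1 = some (actions[0]?.getD 0) := by
  rw [show (1:Nat) = 0+1 from rfl, pvPrevSucc_ne actions 0 (by rw [List.getD_eq_getElem?_getD]; exact h), List.getD_eq_getElem?_getD]

theorem pvPrevRaw2z (actions : List Int) (h : actions[1]?.getD 0 = 0) :
    pvPrevRaw actions 2 = pvPrevRaw actions 1 := by
  rw [show (2:Nat) = 1+1 from rfl, pvPrevSucc_zero actions 1 (by rw [List.getD_eq_getElem?_getD]; exact h)]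

theorem pvPrevRaw2n (actions : List Int) (h : ¬ actions[1]?.getD 0 = 0) :
    pvPrevRaw actions 2 = some (actions[1]?.getD 0) := by
  rw [show (2:Nat) = 1+1 from rfl, pvPrevSucc_ne actions 1 (by rw [List.getD_eq_getElem?_getD]; exact h), List.getD_eq_getElem?_getD]

theorem pvPrevRaw3z (actions : List Int) (h : actions[2]?.getD 0 = 0) :
    pvPrevRaw actions 3 = pvPrevRaw actions 2 := by
  rw [show (3:Nat) = 2+1 from rfl, pvPrevSucc_zero actions 2 (by rw [List.getD_eq_getElem?_getD]; exact h)]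

theorem pvPrevRaw3n (actions : List Int) (h : ¬ actions[2]?.getD 0 = 0) :
    pvPrevRaw actions 3 = some (actions[2]?.getD 0) := by
  rw [show (3:Nat) = 2+1 from rfl, pvPrevSucc_ne actions 2 (by rw [List.getD_eq_getElem?_getD]; exact h), List.getD_eq_getElem?_getD]

set_option maxHeartbeats 1000000 in
theorem pvStepRel (actions prices : List Int) (i : Nat) (hi : i < 3)
    (as cs gs us : List Int)
    (hla : as.length = 3) (hlc : cs.length = 3) (hlg : gs.length = 3) (hlu : us.length = 3)
    (hza : ∀ j, i ≤ j → as.getD j 0 = 0) (hzc : ∀ j, i ≤ j → cs.getD j 0 = 0)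
    (hzg : ∀ j, i ≤ j → gs.getD j 0 = 0) (hzu : ∀ j, i ≤ j → us.getD j 0 = 0) :
    pvStepB actions prices (as.sum, cs.sum, gs.sum, pvPrevRaw actions i, us.sum) (i : Int)
      = ((pvStepA actions prices (as, cs, gs, us) (i : Int)).1.sum,
         (pvStepA actions prices (as, cs, gs, us) (i : Int)).2.1.sum,
         (pvStepA actions prices (as, cs, gs, us) (i : Int)).2.2.1.sum,
         pvPrevRaw actions (i + 1),
         (pvStepA actions prices (as, cs, gs, us) (i : Int)).2.2.2.sum)
    ∧ (pvStepA actions prices (as, cs, gs, us) (i : Int)).1.length = 3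
    ∧ (pvStepA actions prices (as, cs, gs, us) (i : Int)).2.1.length = 3
    ∧ (pvStepA actions prices (as, cs, gs, us) (i : Int)).2.2.1.length = 3
    ∧ (pvStepA actions prices (as, cs, gs, us) (i : Int)).2.2.2.length = 3
    ∧ (∀ j, i + 1 ≤ j → (pvStepA actions prices (as, cs, gs, us) (i : Int)).1.getD j 0 = 0)
    ∧ (∀ j, i + 1 ≤ j → (pvStepA actions prices (as, cs, gs, us) (i : Int)).2.1.getD j 0 = 0)
    ∧ (∀ j, i + 1 ≤ j → (pvStepA actions prices (as, cs, gs, us) (i : Int)).2.2.1.getD j 0 = 0)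
    ∧ (∀ j, i + 1 ≤ j → (pvStepA actions prices (as, cs, gs, us) (i : Int)).2.2.2.getD j 0 = 0) := by
  have hm1 : PySem.List.pyRange ((1:Int)-1) (-1) (-1) = [(0:Int)] := by decide
  have hm2 : PySem.List.pyRange ((2:Int)-1) (-1) (-1) = [(1:Int),0] := by decide
  obtain ⟨A0, A1, A2, rfl⟩ := List.length_eq_three.mp hla
  obtain ⟨C0, C1, C2, rfl⟩ := List.length_eq_three.mp hlc
  obtain ⟨G0, G1, G2, rfl⟩ := List.length_eq_three.mp hlg
  obtain ⟨U0, U1, U2, rfl⟩ := List.length_eq_three.mp hlu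
  interval_cases i
  · -- i = 0 : all entries are zero
    have e1 : A0 = 0 := by simpa using hza 0 (by omega)
    have e2 : C0 = 0 := by simpa using hzc 0 (by omega)
    have e3 : G0 = 0 := by simpa using hzg 0 (by omega)
    have e4 : U0 = 0 := by simpa using hzu 0 (by omega)
    have e5 : A1 = 0 := by simpa using hza 1 (by omega)
    have e6 : C1 = 0 := by simpa using hzc 1 (by omega)
    have e7 : G1 = 0 := by simpa using hzg 1 (by omega)
    have e8 : U1 = 0 := by simpa using hzu 1 (by omega)
    have e9 : A2 = 0 := by simpa using hza 2 (by omega)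
    have e10 : C2 = 0 := by simpa using hzc 2 (by omega)
    have e11 : G2 = 0 := by simpa using hzg 2 (by omega)
    have e12 : U2 = 0 := by simpa using hzu 2 (by omega)
    subst e1 e2 e3 e4 e5 e6 e7 e8 e9 e10 e11 e12
    simp only [pvStepA, pvStepB, Nat.cast_zero, pvPrevRaw0]
    norm_num [PySem.List.pyGetD_ofNat', PySem.List.pyGetD_zero]
    split_ifs with h1 h2 h3 <;>
      simp_all [pvPrevRaw1z, pvPrevRaw1n] <;>
      ((repeat' constructor) <;>
        first
        | omega
        | trivial
        | (intro j hj; rcases j with _|_|_|j <;> simp_all)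
        | simp_all
        | ring1)
  · -- i = 1 : entries at indices ≥ 1 are zero
    have e5 : A1 = 0 := by simpa using hza 1 (by omega)
    have e6 : C1 = 0 := by simpa using hzc 1 (by omega)
    have e7 : G1 = 0 := by simpa using hzg 1 (by omega)
    have e8 : U1 = 0 := by simpa using hzu 1 (by omega)
    have e9 : A2 = 0 := by simpa using hza 2 (by omega)
    have e10 : C2 = 0 := by simpa using hzc 2 (by omega)
    have e11 : G2 = 0 := by simpa using hzg 2 (by omega)
    have e12 : U2 = 0 := by simpa using hzu 2 (by omega)
    subst e5 e6 e7 e8 e9 e10 e11 e12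
    have hpz : actions[1]?.getD 0 = 0 → pvPrevRaw actions 2 = pvPrevRaw actions 1 :=
      pvPrevRaw2z actions
    have hpn : ¬ actions[1]?.getD 0 = 0 → pvPrevRaw actions 2 = some (actions[1]?.getD 0) :=
      pvPrevRaw2n actions
    simp only [pvStepA, pvStepB, Nat.cast_one, hm1, pvPrev1]
    norm_num [PySem.List.pyGetD_ofNat', PySem.List.pyGetD_zero]
    generalize hA : actions[1]?.getD 0 = av at hpz hpn ⊢
    split_ifs <;>
      simp_all [PySem.List.slice_to] <;>
      ((repeat' constructor) <;>
        first
        | omega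
        | trivial
        | (intro j hj; rcases j with _|_|_|j <;> simp_all)
        | simp_all
        | ring1)
  · -- i = 2 : entries at index 2 are zero
    have e9 : A2 = 0 := by simpa using hza 2 (by omega)
    have e10 : C2 = 0 := by simpa using hzc 2 (by omega)
    have e11 : G2 = 0 := by simpa using hzg 2 (by omega)
    have e12 : U2 = 0 := by simpa using hzu 2 (by omega)
    subst e9 e10 e11 e12
    have hpz : actions[2]?.getD 0 = 0 → pvPrevRaw actions 3 = pvPrevRaw actions 2 :=
      pvPrevRaw3z actions
    have hpn : ¬ actions[2]?.getD 0 = 0 → pvPrevRaw actions 3 = some (actions[2]?.getD 0) :=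
      pvPrevRaw3n actions
    simp only [pvStepA, pvStepB, Nat.cast_ofNat, hm2, pvPrev2]
    norm_num [PySem.List.pyGetD_ofNat', PySem.List.pyGetD_zero]
    generalize hA : actions[2]?.getD 0 = av at hpz hpn ⊢
    split_ifs <;>
      simp_all [PySem.List.slice_to] <;>
      ((repeat' constructor) <;>
        first
        | omega
        | trivial
        | (intro j hj; rcases j with _|_|_|j <;> simp_all)
        | simp_all
        | ring1)

set_option maxHeartbeats 1000000 in
theorem pvMainEq (actions price_changes : List Int) :
    calculate_utility actions price_changes = calculate_utility_alt actions price_changes := by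
  have hr : PySem.List.pyRange 0 3 1 = [(0:Int), 1, 2] := by decide
  have hz3 : ∀ j : Nat, 0 ≤ j → ([0, 0, 0] : List Int).getD j 0 = 0 := by
    intro j _; rcases j with _|_|_|j <;> simp
  have hz3' : ∀ i : Nat, ∀ j : Nat, i ≤ j → ([0, 0, 0] : List Int).getD j 0 = 0 := by
    intro i j _; exact hz3 j (by omega)
  obtain ⟨e0, l01, l02, l03, l04, z01, z02, z03, z04⟩ :=
    pvStepRel actions (pvBuildPrices price_changes [2]) 0 (by omega)
      [0,0,0] [0,0,0] [0,0,0] [0,0,0] rfl rfl rfl rfl (hz3' 0) (hz3' 0) (hz3' 0) (hz3' 0)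
  simp only [Nat.cast_zero] at e0 l01 l02 l03 l04 z01 z02 z03 z04
  obtain ⟨e1, l11, l12, l13, l14, z11, z12, z13, z14⟩ :=
    pvStepRel actions (pvBuildPrices price_changes [2]) 1 (by omega)
      _ _ _ _ l01 l02 l03 l04 z01 z02 z03 z04
  simp only [Nat.cast_one] at e1 l11 l12 l13 l14 z11 z12 z13 z14
  obtain ⟨e2, _, _, _, _, _, _, _, _⟩ :=
    pvStepRel actions (pvBuildPrices price_changes [2]) 2 (by omega)
      _ _ _ _ l11 l12 l13 l14 z11 z12 z13 z14
  simp only [Nat.cast_ofNat] at e2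
  simp only [calculate_utility, calculate_utility_alt, hr, List.foldl]
  have hinit : ((0:Int), (0:Int), (0:Int), (none : Option Int), (0:Int))
      = (([0,0,0] : List Int).sum, ([0,0,0] : List Int).sum, ([0,0,0] : List Int).sum,
         pvPrevRaw actions 0, ([0,0,0] : List Int).sum) := by
    simp [pvPrevRaw0]
  rw [hinit, e0, e1, e2]

-- ===== VERDICT (by name: the statement is the Claim_ definition above) =====
theorem calculate_utility_spec : Claim_equal_calculate_utility := by
  intro actions price_changes _ _
  unfold Spec_calculate_utility
  exact pvMainEq actions price_changes
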